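-- pv_equiv track=rewrite | github.com/posl/comment_recommendation | script/mod_gen/4_time/ja/226_C/8.py | max_time_to_learn
-- ===== SOURCE A (Python) =====
-- def max_time_to_learn(n, a):
--     m = 0
--     for i in range(n):
--         if len(a[i]) == 0:
--             m = max(m, 0)
--         else:
--             m = max(m, max(a[i]))
--     return m
-- ===== SOURCE B (Python) =====
-- def max_time_to_learn(n, a):
--     vals = sorted(v for i in range(n) for v in a[i])
--     return max(0, vals[-1]) if vals else 0
-- ===== Notes on version B (the rewrite author's own statement) =====
-- stated objective: alternative
-- what changed: Sorts the flattened elements of the first n sublists and reads the global maximum off the last position of the sorted list (floored at 0), replacing A's running per-sublist-max accumulator with an empty-sublist branch.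
import Mathlib
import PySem

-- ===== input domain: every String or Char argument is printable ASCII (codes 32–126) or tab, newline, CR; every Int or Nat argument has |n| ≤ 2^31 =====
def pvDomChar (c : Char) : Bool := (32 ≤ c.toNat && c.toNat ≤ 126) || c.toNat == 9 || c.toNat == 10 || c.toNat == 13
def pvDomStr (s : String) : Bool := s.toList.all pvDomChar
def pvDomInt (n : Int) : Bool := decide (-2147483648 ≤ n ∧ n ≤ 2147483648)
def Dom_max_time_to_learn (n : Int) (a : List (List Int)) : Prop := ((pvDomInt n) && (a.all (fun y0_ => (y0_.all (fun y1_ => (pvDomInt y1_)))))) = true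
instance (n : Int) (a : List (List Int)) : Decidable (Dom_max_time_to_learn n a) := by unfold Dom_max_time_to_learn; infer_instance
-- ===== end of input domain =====

-- B sorts the flattened elements of the first n sublists and reads the maximum off the
-- last sorted position (floored at 0), instead of A's running-max accumulator; same return value.

-- ===== PORT A =====
-- literal port of A: m = 0; for i in range(n): m = max(m, 0) or max(m, max(a[i]))
-- (a[i] via pyGet?; the none case is unreachable under Pre_, where Python would raise IndexError)
def max_time_to_learn (n : Int) (a : List (List Int)) : Int :=
  (PySem.List.pyRange 0 n 1).foldl
    (fun m i =>
      match PySem.List.pyGet? a i with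
      | none => m
      | some xs =>
        match xs with
        | [] => max m 0
        | h :: t => max m (t.foldl max h)) 0

-- ===== PORT B =====
-- literal port of Source B: vals = sorted(flattened elements); max(0, vals[-1]) if vals else 0
def max_time_to_learn_alt (n : Int) (a : List (List Int)) : Int :=
  let vals : List Int :=
    PySem.List.sorted
      ((PySem.List.pyRange 0 n 1).flatMap (fun i => (PySem.List.pyGet? a i).getD []))
      (fun x => x) false
  match vals with
  | [] => 0
  | h :: t => max 0 ((h :: t).getLast (List.cons_ne_nil h t))

-- ===== PRECONDITION & SPEC =====
-- Pre_ excludes exactly the inputs where A raises IndexError (n exceeds len(a)).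
def Pre_max_time_to_learn (n : Int) (a : List (List Int)) : Prop := n ≤ (a.length : Int)
instance (n : Int) (a : List (List Int)) : Decidable (Pre_max_time_to_learn n a) := by
  unfold Pre_max_time_to_learn; infer_instance
def pvWitness_max_time_to_learn : Int × List (List Int) := (2, [[3, -1], []])

def Spec_max_time_to_learn (n : Int) (a : List (List Int)) (out : Int) : Prop := out = max_time_to_learn_alt n a
instance (n : Int) (a : List (List Int)) (out : Int) : Decidable (Spec_max_time_to_learn n a out) := by unfold Spec_max_time_to_learn; infer_instance

-- ===== CLAIM (what is proved, stated in full; the proofs are below) =====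
def Claim_equal_max_time_to_learn : Prop := ∀ (n : Int) (a : List (List Int)), Dom_max_time_to_learn n a → Pre_max_time_to_learn n a → Spec_max_time_to_learn n a (max_time_to_learn n a)

-- ===== LEMMAS AND PROOFS =====

theorem foldl_max_init (t : List Int) (m h : Int) :
    t.foldl max (max m h) = max m (t.foldl max h) := by
  induction t generalizing h with
  | nil => simp
  | cons x t ih => simp only [List.foldl_cons, max_assoc, ih]

-- A's loop computes foldl max 0 over the flattened stream
theorem max_time_folds (a : List (List Int)) (L : List Int) (m : Int) (hm : 0 ≤ m) :
    L.foldl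
      (fun m i =>
        match PySem.List.pyGet? a i with
        | none => m
        | some xs =>
          match xs with
          | [] => max m 0
          | h :: t => max m (t.foldl max h)) m
    = (L.flatMap (fun i => (PySem.List.pyGet? a i).getD [])).foldl max m := by
  induction L generalizing m with
  | nil => simp
  | cons i L ih =>
    simp only [List.foldl_cons, List.flatMap_cons, List.foldl_append]
    cases hg : PySem.List.pyGet? a i with
    | none => simpa using ih m hm
    | some xs =>
      cases xs with
      | nil => simpa [max_eq_left hm] using ih m hm
      | cons h t =>
        have hm' : 0 ≤ max m (t.foldl max h) := le_trans hm (le_max_left _ _)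
        rw [ih _ hm']
        simp only [Option.getD_some, List.foldl_cons]
        rw [foldl_max_init t m h, foldl_max_init _ m _]

-- foldl max is invariant under permutation (max is right-commutative)
theorem foldl_max_perm {l₁ l₂ : List Int} (h : l₁.Perm l₂) (m : Int) :
    l₁.foldl max m = l₂.foldl max m :=
  h.foldl_eq (b := m)

theorem le_foldl_max (t : List Int) (m : Int) : m ≤ t.foldl max m := by
  induction t generalizing m with
  | nil => simp
  | cons x t ih => exact le_trans (le_max_left m x) (ih (max m x))

-- for a ≤-sorted nonempty list, the last element is the fold-max of the list
theorem last_eq_foldl_max (h : Int) (t : List Int)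
    (hp : (h :: t).Pairwise (· ≤ ·)) :
    (h :: t).getLast (List.cons_ne_nil h t) = t.foldl max h := by
  induction t generalizing h with
  | nil => simp
  | cons x t ih =>
    have hhx : h ≤ x := (List.pairwise_cons.mp hp).1 x (by simp)
    rw [List.getLast_cons (List.cons_ne_nil x t), ih x hp.tail]
    simp only [List.foldl_cons]
    rw [foldl_max_init t h x]
    exact (max_eq_right (le_trans hhx (le_foldl_max t x))).symm

-- ===== VERDICT (by name: the statement is the Claim_ definition above) =====
theorem max_time_to_learn_spec : Claim_equal_max_time_to_learn := by
  intro n a _ _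
  unfold Spec_max_time_to_learn max_time_to_learn max_time_to_learn_alt
  rw [max_time_folds a _ 0 le_rfl]
  set F := (PySem.List.pyRange 0 n 1).flatMap (fun i => (PySem.List.pyGet? a i).getD []) with hF
  have hperm : F.Perm (PySem.List.sorted F (fun x => x) false) :=
    (PySem.List.sorted_perm (xs := F) (key := fun x => x) (rev := false)).symm
  rw [foldl_max_perm hperm 0]
  have hpair : (PySem.List.sorted F (fun x => x) false).Pairwise (· ≤ ·) := by
    simpa using PySem.List.sorted_pairwise (xs := F) (key := fun x => x)
  cases hs : PySem.List.sorted F (fun x => x) false with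
  | nil => simp
  | cons h t =>
    rw [hs] at hpair
    show List.foldl max 0 (h :: t) = max 0 ((h :: t).getLast (List.cons_ne_nil h t))
    rw [last_eq_foldl_max h t hpair, List.foldl_cons, foldl_max_init t 0 h]
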